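-- pv_equiv track=rewrite | github.com/Ahmed-Gamal-Elshafei/Calculate-Client-security-hash | sub_process/work_item_data.py | build_data_for_sha1
-- ===== SOURCE A (Python) =====
-- def build_data_for_sha1(client_data: str) -> str:
--     """Builds a string for SHA1 hash from the client information."""
--     client_id, client_name, client_country = "", "", ""
--     client_info_lines = client_data.split("\n")
--
--     for line in client_info_lines:
--         if line.startswith("Client ID:"):
--             client_id = line.replace("Client ID:", "").strip()
--         elif line.startswith("Client Name:"):
--             client_name = line.replace("Client Name:", "").strip()
--         elif line.startswith("Client Country:"):
--             client_country = line.replace("Client Country:", "").strip()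
--
--     return f"{client_id}-{client_name}-{client_country}"
-- ===== SOURCE B (Python) =====
-- def build_data_for_sha1(client_data: str) -> str:
--     """Builds a string for SHA1 hash from the client information."""
--     lines_reversed = list(reversed(client_data.split("\n")))
--
--     def last_value(label):
--         for line in lines_reversed:
--             if line.startswith(label):
--                 return line.replace(label, "").strip()
--         return ""
--
--     return "-".join(last_value(label)
--                     for label in ("Client ID:", "Client Name:", "Client Country:"))
-- ===== Notes on version B (the rewrite author's own statement) =====
-- stated objective: alternative
-- what changed: Instead of one forward pass updating three scalar accumulators through an if/elif chain, B scans the reversed line list once per label, taking the first (i.e. last-occurring) line with that prefix, and joins the three cleaned values; last-occurrence-wins falls out of the reverse scan rather than of repeated reassignment.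
import Mathlib
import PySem

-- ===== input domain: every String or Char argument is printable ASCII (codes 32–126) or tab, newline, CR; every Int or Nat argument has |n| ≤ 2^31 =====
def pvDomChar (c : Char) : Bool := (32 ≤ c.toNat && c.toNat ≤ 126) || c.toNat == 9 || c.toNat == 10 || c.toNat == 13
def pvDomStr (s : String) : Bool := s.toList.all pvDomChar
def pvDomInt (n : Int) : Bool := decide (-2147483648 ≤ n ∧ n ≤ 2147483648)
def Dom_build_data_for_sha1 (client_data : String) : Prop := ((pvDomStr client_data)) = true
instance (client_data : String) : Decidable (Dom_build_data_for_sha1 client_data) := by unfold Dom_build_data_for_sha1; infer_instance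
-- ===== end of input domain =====

-- B replaces A's forward pass with three scalar accumulators by one reverse scan per label
-- (first match in the reversed line list = last occurrence); objective: alternative decomposition.


-- ===== PORT A =====
-- step of A's for-loop over the state (client_id, client_name, client_country)
def pvStepA (st : String × String × String) (line : String) : String × String × String :=
  if PySem.Str.startswith line "Client ID:" then
    (PySem.Str.strip (PySem.Str.replace line "Client ID:" ""), st.2.1, st.2.2)
  else if PySem.Str.startswith line "Client Name:" then
    (st.1, PySem.Str.strip (PySem.Str.replace line "Client Name:" ""), st.2.2)
  else if PySem.Str.startswith line "Client Country:" then
    (st.1, st.2.1, PySem.Str.strip (PySem.Str.replace line "Client Country:" ""))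
  else st

def build_data_for_sha1 (client_data : String) : String :=
  let client_info_lines := (PySem.Chars.splitOn client_data.toList "\n".toList).map String.ofList
  let st := client_info_lines.foldl pvStepA ("", "", "")
  PySem.Str.join "-" [st.1, st.2.1, st.2.2]

-- ===== PORT B =====
-- first line of the reversed list starting with `label`, cleaned; "" if none
def pvLastValue (lines_reversed : List String) (label : String) : String :=
  match lines_reversed.find? (fun line => PySem.Str.startswith line label) with
  | some line => PySem.Str.strip (PySem.Str.replace line label "")
  | none => ""

def build_data_for_sha1_alt (client_data : String) : String :=
  let lines_reversed := ((PySem.Chars.splitOn client_data.toList "\n".toList).map String.ofList).reverse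
  PySem.Str.join "-"
    (["Client ID:", "Client Name:", "Client Country:"].map (pvLastValue lines_reversed))

-- ===== PRECONDITION & SPEC =====
def Spec_build_data_for_sha1 (client_data : String) (out : String) : Prop := out = build_data_for_sha1_alt client_data
instance (client_data : String) (out : String) : Decidable (Spec_build_data_for_sha1 client_data out) := by unfold Spec_build_data_for_sha1; infer_instance

-- ===== CLAIM (what is proved, stated in full; the proofs are below) =====
def Claim_equal_build_data_for_sha1 : Prop := ∀ (client_data : String), Dom_build_data_for_sha1 client_data → Spec_build_data_for_sha1 client_data (build_data_for_sha1 client_data)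

-- ===== LEMMAS AND PROOFS =====

-- the three labels are mutually exclusive prefixes: no line starts with two of them
theorem pv_excl {line : String} {p q : String}
    (hlen : (p.toList).length ≤ (q.toList).length) (hpq : ¬ p.toList <+: q.toList)
    (hp : PySem.Str.startswith line p = true) (hq : PySem.Str.startswith line q = true) : False := by
  rw [PySem.Str.startswith_eq, PySem.Chars.startswith_iff] at hp hq
  exact hpq (List.prefix_of_prefix_length_le hp hq hlen)

theorem pv_fold_eq (lines : List String) : ∀ (a b c : String),
    lines.foldl pvStepA (a, b, c) =
      ((match lines.reverse.find? (fun l => PySem.Str.startswith l "Client ID:") with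
        | some l => PySem.Str.strip (PySem.Str.replace l "Client ID:" "") | none => a),
       (match lines.reverse.find? (fun l => PySem.Str.startswith l "Client Name:") with
        | some l => PySem.Str.strip (PySem.Str.replace l "Client Name:" "") | none => b),
       (match lines.reverse.find? (fun l => PySem.Str.startswith l "Client Country:") with
        | some l => PySem.Str.strip (PySem.Str.replace l "Client Country:" "") | none => c)) := by
  induction lines with
  | nil => intro a b c; rfl
  | cons hd tl ih =>
    intro a b c
    have hrev : ∀ (p : String → Bool),
        (hd :: tl).reverse.find? p =
          match tl.reverse.find? p with
          | some l => some l
          | none => if p hd then some hd else none := by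
      intro p
      rw [List.reverse_cons, List.find?_append]
      cases tl.reverse.find? p
      · cases h : p hd <;> simp [h, -PySem.Str.startswith_eq]
      · rfl
    rw [List.foldl_cons, hrev, hrev, hrev]
    by_cases h1 : PySem.Str.startswith hd "Client ID:" = true
    · by_cases h2 : PySem.Str.startswith hd "Client Name:" = true
      · exact absurd h2 (fun h2 => pv_excl (by decide) (by decide) h1 h2)
      by_cases h3 : PySem.Str.startswith hd "Client Country:" = true
      · exact absurd h3 (fun h3 => pv_excl (by decide) (by decide) h1 h3)
      have hs : pvStepA (a, b, c) hd =
          (PySem.Str.strip (PySem.Str.replace hd "Client ID:" ""), b, c) := by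
        unfold pvStepA; rw [if_pos h1]
      rw [hs, ih]
      cases List.find? (fun l => PySem.Str.startswith l "Client ID:") tl.reverse <;>
        cases List.find? (fun l => PySem.Str.startswith l "Client Name:") tl.reverse <;>
          cases List.find? (fun l => PySem.Str.startswith l "Client Country:") tl.reverse <;>
            simp [h1, h2, h3, -PySem.Str.startswith_eq]
    · by_cases h2 : PySem.Str.startswith hd "Client Name:" = true
      · by_cases h3 : PySem.Str.startswith hd "Client Country:" = true
        · exact absurd h3 (fun h3 => pv_excl (by decide) (by decide) h2 h3)
        have hs : pvStepA (a, b, c) hd =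
            (a, PySem.Str.strip (PySem.Str.replace hd "Client Name:" ""), c) := by
          unfold pvStepA; rw [if_neg h1, if_pos h2]
        rw [hs, ih]
        cases List.find? (fun l => PySem.Str.startswith l "Client ID:") tl.reverse <;>
          cases List.find? (fun l => PySem.Str.startswith l "Client Name:") tl.reverse <;>
            cases List.find? (fun l => PySem.Str.startswith l "Client Country:") tl.reverse <;>
              simp [h1, h2, h3, -PySem.Str.startswith_eq]
      · by_cases h3 : PySem.Str.startswith hd "Client Country:" = true
        · have hs : pvStepA (a, b, c) hd =
              (a, b, PySem.Str.strip (PySem.Str.replace hd "Client Country:" "")) := by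
            unfold pvStepA; rw [if_neg h1, if_neg h2, if_pos h3]
          rw [hs, ih]
          cases List.find? (fun l => PySem.Str.startswith l "Client ID:") tl.reverse <;>
            cases List.find? (fun l => PySem.Str.startswith l "Client Name:") tl.reverse <;>
              cases List.find? (fun l => PySem.Str.startswith l "Client Country:") tl.reverse <;>
                simp [h1, h2, h3, -PySem.Str.startswith_eq]
        · have hs : pvStepA (a, b, c) hd = (a, b, c) := by
            unfold pvStepA; rw [if_neg h1, if_neg h2, if_neg h3]
          rw [hs, ih]
          cases List.find? (fun l => PySem.Str.startswith l "Client ID:") tl.reverse <;>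
            cases List.find? (fun l => PySem.Str.startswith l "Client Name:") tl.reverse <;>
              cases List.find? (fun l => PySem.Str.startswith l "Client Country:") tl.reverse <;>
                simp [h1, h2, h3, -PySem.Str.startswith_eq]

-- ===== VERDICT (by name: the statement is the Claim_ definition above) =====
theorem build_data_for_sha1_spec : Claim_equal_build_data_for_sha1 := by
  intro client_data _
  unfold Spec_build_data_for_sha1 build_data_for_sha1 build_data_for_sha1_alt pvLastValue
  dsimp only
  rw [pv_fold_eq]
  rfl
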